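-- pv_equiv track=rewrite | github.com/consolebuddy/fastapi-rag-langraph | agents/compression.py | budget_chunks
-- ===== SOURCE A (Python) =====
-- from typing import List, Dict
--
-- def budget_chunks(chunks: List[Dict], max_chars: int = 12000) -> List[Dict]:
--     sel, total = [], 0
--     for c in chunks:
--         t = c.get("text", "")
--         if total + len(t) <= max_chars:
--             sel.append(c)
--             total += len(t)
--         else:
--             break
--     return sel
-- ===== SOURCE B (Python) =====
-- import bisect
-- from itertools import accumulate
--
--
-- def budget_chunks(chunks, max_chars=12000):
--     sums = list(accumulate(len(c.get("text", "")) for c in chunks))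
--     return chunks[:bisect.bisect_right(sums, max_chars)]
-- ===== Notes on version B (the rewrite author's own statement) =====
-- stated objective: alternative
-- what changed: Replaces the accumulate-and-break loop with a prefix-sum table of cumulative text lengths followed by a bisect_right binary search for the cutoff, returning the slice chunks[:cutoff].
import Mathlib
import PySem

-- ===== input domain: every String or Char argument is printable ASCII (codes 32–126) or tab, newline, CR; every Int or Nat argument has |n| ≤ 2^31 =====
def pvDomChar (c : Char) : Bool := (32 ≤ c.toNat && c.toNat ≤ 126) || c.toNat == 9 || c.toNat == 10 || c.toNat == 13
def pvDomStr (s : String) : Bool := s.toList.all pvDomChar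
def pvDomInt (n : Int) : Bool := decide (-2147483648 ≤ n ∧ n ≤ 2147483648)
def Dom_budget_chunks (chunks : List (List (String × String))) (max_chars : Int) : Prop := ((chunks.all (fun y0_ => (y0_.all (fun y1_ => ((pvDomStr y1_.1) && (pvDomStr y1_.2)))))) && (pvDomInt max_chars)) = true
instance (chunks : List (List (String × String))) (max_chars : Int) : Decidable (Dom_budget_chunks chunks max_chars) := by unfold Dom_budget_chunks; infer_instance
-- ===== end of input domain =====

-- B replaces A's accumulate-and-break loop by a prefix-sum table + bisect_right binary search (alternative decomposition, same cost).


-- ===== PORT A =====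
-- len(c.get("text", "")): association-list dict, first-match lookup
def bcTextLen (c : List (String × String)) : Int :=
  PySem.Str.len ((PySem.Dict.mk c).getD "text" "")

-- the for-loop with `break`: structural recursion over the chunks carrying the running total
def bcLoop (max_chars : Int) : List (List (String × String)) → Int → List (List (String × String))
  | [], _ => []
  | c :: rest, total =>
    if total + bcTextLen c ≤ max_chars then c :: bcLoop max_chars rest (total + bcTextLen c)
    else []

def budget_chunks (chunks : List (List (String × String))) (max_chars : Int) : List (List (String × String)) :=
  bcLoop max_chars chunks 0

-- ===== PORT B =====
-- itertools.accumulate of the text lengths (running sums)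
def bcAccum : List Int → Int → List Int
  | [], _ => []
  | l :: rest, acc => (acc + l) :: bcAccum rest (acc + l)

def budget_chunks_alt (chunks : List (List (String × String))) (max_chars : Int) : List (List (String × String)) :=
  let sums := bcAccum (chunks.map bcTextLen) 0
  chunks.take (PySem.List.bisectRight sums max_chars)

-- ===== PRECONDITION & SPEC =====
def Spec_budget_chunks (chunks : List (List (String × String))) (max_chars : Int) (out : List (List (String × String))) : Prop := out = budget_chunks_alt chunks max_chars
instance (chunks : List (List (String × String))) (max_chars : Int) (out : List (List (String × String))) : Decidable (Spec_budget_chunks chunks max_chars out) := by unfold Spec_budget_chunks; infer_instance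

-- ===== CLAIM (what is proved, stated in full; the proofs are below) =====
def Claim_equal_budget_chunks : Prop := ∀ (chunks : List (List (String × String))) (max_chars : Int), Dom_budget_chunks chunks max_chars → Spec_budget_chunks chunks max_chars (budget_chunks chunks max_chars)

-- ===== LEMMAS AND PROOFS =====

-- every running sum is at least the starting accumulator when all increments are nonnegative
theorem bcAccum_mem_ge (lens : List Int) (acc : Int) (hpos : ∀ l ∈ lens, 0 ≤ l) :
    ∀ y ∈ bcAccum lens acc, acc ≤ y := by
  induction lens generalizing acc with
  | nil => simp [bcAccum]
  | cons l rest ih =>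
    intro y hy
    simp only [bcAccum, List.mem_cons] at hy
    have hl : 0 ≤ l := hpos l (by simp)
    rcases hy with rfl | hy
    · omega
    · have := ih (acc + l) (fun a ha => hpos a (by simp [ha])) y hy
      omega

theorem bcAccum_pairwise (lens : List Int) (acc : Int) (hpos : ∀ l ∈ lens, 0 ≤ l) :
    (bcAccum lens acc).Pairwise (· ≤ ·) := by
  induction lens generalizing acc with
  | nil => simp [bcAccum]
  | cons l rest ih =>
    have hl : 0 ≤ l := hpos l (by simp)
    have hrest : ∀ a ∈ rest, (0:Int) ≤ a := fun a ha => hpos a (by simp [ha])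
    refine List.pairwise_cons.2 ⟨fun y hy => ?_, ih (acc + l) hrest⟩
    have := bcAccum_mem_ge rest (acc + l) hrest y hy
    omega

-- indices below the takeWhile length satisfy the predicate; the next one (if any) does not
theorem takeWhile_len_spec (p : Int → Bool) (xs : List Int) :
    (∀ j (_ : j < (xs.takeWhile p).length) (hj' : j < xs.length), p xs[j]) ∧
      (∀ h : (xs.takeWhile p).length < xs.length, ¬ p (xs[(xs.takeWhile p).length])) := by
  induction xs with
  | nil => simp
  | cons a t ih =>
    cases hp : p a with
    | false =>
      rw [List.takeWhile_cons_of_neg (by simp [hp])]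
      exact ⟨fun j hj _ => by simp at hj, fun _ => by simp [hp]⟩
    | true =>
      rw [List.takeWhile_cons_of_pos hp]
      simp only [List.length_cons]
      constructor
      · intro j hj hj'
        cases j with
        | zero => simpa using hp
        | succ j =>
          simp only [List.getElem_cons_succ]
          exact ih.1 j (by simpa using hj) (by simpa using hj')
      · intro h
        simp only [List.getElem_cons_succ]
        exact ih.2 (by simpa using h)

-- bisect_right on a nondecreasing list returns exactly the takeWhile-(≤ x) length
theorem bisectRight_eq_takeWhile (xs : List Int) (x : Int) (h : xs.Pairwise (· ≤ ·)) :
    PySem.List.bisectRight xs x = (xs.takeWhile (fun a => a ≤ x)).length := by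
  obtain ⟨hk, hle, hgt⟩ := PySem.List.bisectRight_spec xs x h
  obtain ⟨htw1, htw2⟩ := takeWhile_len_spec (fun a => decide (a ≤ x)) xs
  have ht : (xs.takeWhile (fun a => decide (a ≤ x))).length ≤ xs.length :=
    (List.takeWhile_sublist _).length_le
  set k := PySem.List.bisectRight xs x with hkdef
  set t := (xs.takeWhile (fun a => decide (a ≤ x))).length with htdef
  rcases lt_trichotomy k t with hlt | heq | hgt'
  · exfalso
    have h1 := htw1 k (by omega) (by omega)
    have h2 := hgt k (by omega) le_rfl
    simp only [decide_eq_true_eq] at h1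
    omega
  · exact heq
  · exfalso
    have hlen : t < xs.length := by omega
    have h1 := hle t hlen (by omega)
    have h2 := htw2 hlen
    simp only [decide_eq_true_eq] at h2
    omega

-- A's loop is the take of the takeWhile length over the running sums starting at `total`
theorem bcLoop_eq_take (max_chars : Int) (chunks : List (List (String × String))) (total : Int) :
    bcLoop max_chars chunks total =
      chunks.take ((bcAccum (chunks.map bcTextLen) total).takeWhile (fun a => a ≤ max_chars)).length := by
  induction chunks generalizing total with
  | nil => simp [bcLoop, bcAccum]
  | cons c rest ih =>
    by_cases hc : total + bcTextLen c ≤ max_chars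
    · simp only [bcLoop, if_pos hc, List.map_cons, bcAccum]
      rw [List.takeWhile_cons_of_pos (by simpa using hc)]
      simp only [List.length_cons, List.take_succ_cons]
      rw [ih]
    · simp only [bcLoop, if_neg hc, List.map_cons, bcAccum]
      rw [List.takeWhile_cons_of_neg (by simpa using hc)]
      simp

theorem bcTextLen_nonneg (c : List (String × String)) : 0 ≤ bcTextLen c := by
  unfold bcTextLen
  rw [PySem.Str.len_eq]
  positivity

-- ===== VERDICT (by name: the statement is the Claim_ definition above) =====
theorem budget_chunks_spec : Claim_equal_budget_chunks := by
  intro chunks max_chars _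
  unfold Spec_budget_chunks budget_chunks budget_chunks_alt
  show bcLoop max_chars chunks 0 =
    chunks.take (PySem.List.bisectRight (bcAccum (chunks.map bcTextLen) 0) max_chars)
  have hpos : ∀ l ∈ chunks.map bcTextLen, (0:Int) ≤ l := by
    intro l hl
    obtain ⟨c, _, rfl⟩ := List.mem_map.1 hl
    exact bcTextLen_nonneg c
  rw [bcLoop_eq_take, bisectRight_eq_takeWhile _ _ (bcAccum_pairwise _ 0 hpos)]
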